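-- pv_equiv track=rewrite | github.com/flexxyfluxx/LunarLander | jar go brrr/Lib_all/microbit/displayclass.py | _rowToListMono
-- ===== SOURCE A (Python) =====
-- def _rowToListMono(rowInt, textColor, bgColor):
--     li = [bgColor] * 5
--     mask = 1
--     for k in range(5):
--         li[k] = textColor if ((rowInt & mask) != 0) else bgColor
--         mask = 2 * mask
--     li.reverse()
--     return li
-- ===== SOURCE B (Python) =====
-- def _rowToListMono(rowInt, textColor, bgColor):
--     s = format(rowInt & 31, '05b')
--     return [textColor if ch == '1' else bgColor for ch in s]
-- ===== Notes on version B (the rewrite author's own statement) =====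
-- stated objective: idiomatic
-- what changed: B formats the masked low five bits with format(rowInt & 31, '05b') and maps the digit characters to colors, instead of A's mutable list, doubling bit mask loop and final reverse.
import Mathlib
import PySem

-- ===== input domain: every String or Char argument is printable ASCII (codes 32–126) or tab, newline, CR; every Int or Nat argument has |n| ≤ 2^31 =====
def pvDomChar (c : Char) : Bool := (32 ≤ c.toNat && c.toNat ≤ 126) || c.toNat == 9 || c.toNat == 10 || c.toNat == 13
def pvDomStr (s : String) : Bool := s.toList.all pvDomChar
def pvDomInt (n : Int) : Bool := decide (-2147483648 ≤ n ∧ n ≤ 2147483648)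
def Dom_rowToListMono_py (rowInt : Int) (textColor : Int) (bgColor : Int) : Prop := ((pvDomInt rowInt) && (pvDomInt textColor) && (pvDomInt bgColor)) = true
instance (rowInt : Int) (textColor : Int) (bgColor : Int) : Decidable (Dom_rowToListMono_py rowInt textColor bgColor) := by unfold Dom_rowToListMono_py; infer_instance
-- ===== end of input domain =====

-- B formats the masked low five bits ('05b' string) and maps digit characters to colors,
-- instead of A's mutable list + doubling mask loop + reverse (objective: idiomatic).

-- ===== PORT A =====
-- li = [bgColor]*5; mask = 1; for k in range(5): li[k] = …; mask = 2*mask; li.reverse()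
def rowToListMono_py (rowInt : Int) (textColor : Int) (bgColor : Int) : List Int :=
  let li : List Int := List.replicate 5 bgColor
  let st := (PySem.List.pyRange 0 5 1).foldl
    (fun (st : List Int × Int) (k : Int) =>
      (st.1.set k.toNat (if PySem.Int.band rowInt st.2 ≠ 0 then textColor else bgColor),
       2 * st.2))
    (li, 1)
  st.1.reverse

-- ===== PORT B =====
-- helper for Python's format(n, 'b') on a nonnegative int: its binary digits, MSB first
-- (exact for the n = rowInt & 31 ∈ [0, 31] that B feeds it).
def pyBinDigits : Nat → List Char
  | 0 => []
  | n + 1 => pyBinDigits ((n + 1) / 2) ++ [if (n + 1) % 2 = 1 then '1' else '0']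

-- format(n, '05b'): zero-pad the binary digits to width 5
def pyFormat05b (n : Nat) : List Char :=
  let d := pyBinDigits n
  List.replicate (5 - d.length) '0' ++ d

def rowToListMono_py_alt (rowInt : Int) (textColor : Int) (bgColor : Int) : List Int :=
  (pyFormat05b (PySem.Int.band rowInt 31).toNat).map
    (fun ch => if ch = '1' then textColor else bgColor)

-- ===== PRECONDITION & SPEC =====
def Spec_rowToListMono_py (rowInt : Int) (textColor : Int) (bgColor : Int) (out : List Int) : Prop := out = rowToListMono_py_alt rowInt textColor bgColor
instance (rowInt : Int) (textColor : Int) (bgColor : Int) (out : List Int) : Decidable (Spec_rowToListMono_py rowInt textColor bgColor out) := by unfold Spec_rowToListMono_py; infer_instance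

-- ===== CLAIM (what is proved, stated in full; the proofs are below) =====
def Claim_equal_rowToListMono_py : Prop := ∀ (rowInt : Int) (textColor : Int) (bgColor : Int), Dom_rowToListMono_py rowInt textColor bgColor → Spec_rowToListMono_py rowInt textColor bgColor (rowToListMono_py rowInt textColor bgColor)

-- ===== LEMMAS AND PROOFS =====

theorem two_pow_toNat (k : Nat) : ((2:Int) ^ k).toNat = 2 ^ k := by
  induction k with
  | zero => rfl
  | succ n ih => rw [pow_succ, pow_succ, Int.toNat_mul (by positivity) (by norm_num), ih]; rfl

-- Python's r & 31 is r mod 32 (two's-complement semantics, also for negative r).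
theorem band31_eq_emod (r : Int) : PySem.Int.band r 31 = r % 32 := by
  by_cases h : 0 ≤ r
  · rw [PySem.Int.band_of_nonneg h (by norm_num)]
    have h31 : (31 : Int).toNat = 31 := rfl
    rw [h31]
    have hand : r.toNat &&& 31 = r.toNat % 32 := by
      have := Nat.and_two_pow_sub_one_eq_mod r.toNat 5
      simpa using this
    rw [hand]; omega
  · simp only [PySem.Int.band, if_neg h, if_pos (by norm_num : (0:Int) ≤ 31)]
    have h31 : (31 : Int).toNat = 31 := rfl
    rw [h31]
    have hand : 31 &&& (-r - 1).toNat = (-r - 1).toNat % 32 := by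
      have := Nat.and_two_pow_sub_one_eq_mod (-r - 1).toNat 5
      simpa [Nat.and_comm] using this
    rw [hand]; omega

-- low-bit complement: for a < 32, testBit (31 - a) k = !testBit a k (k < 5)
theorem testBit_compl5 : ∀ (a : Fin 32) (k : Fin 5),
    Nat.testBit (31 - a.val) k.val = ! Nat.testBit a.val k.val := by decide

-- Python's (r & 2^k) != 0 reads bit k of r mod 32, for k < 5.
theorem band_pow_iff (r : Int) (k : Nat) (hk : k < 5) :
    (PySem.Int.band r (2 ^ k) ≠ 0) ↔ Nat.testBit (r % 32).toNat k := by
  have hs : (r % 32).toNat = (r % 32).toNat := rfl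
  by_cases h : 0 ≤ r
  · rw [PySem.Int.band_of_nonneg h (by positivity)]
    rw [two_pow_toNat]
    have hmod : (r % 32).toNat = r.toNat % 32 := by omega
    rw [hmod]
    have h32 : (32 : Nat) = 2 ^ 5 := rfl
    rw [h32, Nat.testBit_mod_two_pow]
    simp [Nat.and_two_pow, hk]
  · have hbpos : (0 : Int) ≤ 2 ^ k := by positivity
    simp only [PySem.Int.band, if_neg h, if_pos hbpos]
    rw [two_pow_toNat]
    set t : Nat := (-r - 1).toNat with ht
    have hmod : (r % 32).toNat = 31 - t % 32 := by omega
    rw [hmod]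
    have hand : 2 ^ k &&& t = (t.testBit k).toNat * 2 ^ k := by
      rw [Nat.and_comm, Nat.and_two_pow]
    have hcompl := testBit_compl5 ⟨t % 32, by omega⟩ ⟨k, hk⟩
    simp only at hcompl
    have htb : t.testBit k = (t % 32).testBit k := by
      have h32 : (32 : Nat) = 2 ^ 5 := rfl
      rw [h32, Nat.testBit_mod_two_pow]; simp [hk]
    rw [hcompl, hand, ← htb]
    rcases hb : t.testBit k with _ | _
    · simp
    · simp

-- the five low bits of r mod 32 decide equality of the two ports
theorem core (s : Nat) (hs : s < 32) (t b : Int) :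
    [if s.testBit 4 then t else b, if s.testBit 3 then t else b,
     if s.testBit 2 then t else b, if s.testBit 1 then t else b,
     if s.testBit 0 then t else b]
      = (pyFormat05b s).map (fun ch => if ch = '1' then t else b) := by
  interval_cases s <;>
    norm_num [pyFormat05b, pyBinDigits, Nat.testBit_succ, Nat.testBit_zero, List.replicate,
      show ('0':Char) ≠ '1' from by decide]

theorem rowToListMono_py_eq (r t b : Int) :
    rowToListMono_py r t b = rowToListMono_py_alt r t b := by
  have hs : (r % 32).toNat < 32 := by omega
  have hA : rowToListMono_py r t b =
      [if PySem.Int.band r 16 ≠ 0 then t else b, if PySem.Int.band r 8 ≠ 0 then t else b,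
       if PySem.Int.band r 4 ≠ 0 then t else b, if PySem.Int.band r 2 ≠ 0 then t else b,
       if PySem.Int.band r 1 ≠ 0 then t else b] := by
    have hr : PySem.List.pyRange 0 5 1 = [0, 1, 2, 3, 4] := by decide
    simp [rowToListMono_py, hr, List.replicate, List.set]
  have h0 : (PySem.Int.band r 1 ≠ 0) ↔ (r % 32).toNat.testBit 0 := by
    simpa using band_pow_iff r 0 (by norm_num)
  have h1 : (PySem.Int.band r 2 ≠ 0) ↔ (r % 32).toNat.testBit 1 := by
    simpa using band_pow_iff r 1 (by norm_num)
  have h2 : (PySem.Int.band r 4 ≠ 0) ↔ (r % 32).toNat.testBit 2 := by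
    simpa using band_pow_iff r 2 (by norm_num)
  have h3 : (PySem.Int.band r 8 ≠ 0) ↔ (r % 32).toNat.testBit 3 := by
    simpa using band_pow_iff r 3 (by norm_num)
  have h4 : (PySem.Int.band r 16 ≠ 0) ↔ (r % 32).toNat.testBit 4 := by
    simpa using band_pow_iff r 4 (by norm_num)
  rw [hA, rowToListMono_py_alt, band31_eq_emod, ← core (r % 32).toNat hs t b]
  simp only [h0, h1, h2, h3, h4]

-- ===== VERDICT (by name: the statement is the Claim_ definition above) =====
theorem rowToListMono_py_spec : Claim_equal_rowToListMono_py := by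
  intro r t b _
  exact rowToListMono_py_eq r t b
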